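-- pv_equiv track=rewrite | github.com/MrBrantCode/unitest_baseline | mut_generate/mist_train_cf/cf_78669/solution.py | entrance
-- ===== SOURCE A (Python) =====
-- def entrance(arr, elem):
--   # Get the indices of all occurrences of the element
--   indices = [i for i, x in enumerate(arr) if x == elem]
--
--   # If there are less than 2 occurrences of the element return 0
--   if len(indices) < 2:
--     return 0
--
--   # Calculate the distance
--   dist = 0
--   for i in range(1, len(indices)):
--     dist += indices[i] - indices[i-1]
--
--   return dist
-- ===== SOURCE B (Python) =====
-- def entrance(arr, elem):
--     first = last = None
--     count = 0
--     for i, x in enumerate(arr):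
--         if x == elem:
--             if first is None:
--                 first = i
--             last = i
--             count += 1
--     return last - first if count >= 2 else 0
-- ===== Notes on version B (the rewrite author's own statement) =====
-- stated objective: simpler
-- what changed: Replaces the build-indices-list-then-sum-consecutive-gaps loop pair with a single maintain-first/last/count pass returning the telescoped closed form last-first.
import Mathlib
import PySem

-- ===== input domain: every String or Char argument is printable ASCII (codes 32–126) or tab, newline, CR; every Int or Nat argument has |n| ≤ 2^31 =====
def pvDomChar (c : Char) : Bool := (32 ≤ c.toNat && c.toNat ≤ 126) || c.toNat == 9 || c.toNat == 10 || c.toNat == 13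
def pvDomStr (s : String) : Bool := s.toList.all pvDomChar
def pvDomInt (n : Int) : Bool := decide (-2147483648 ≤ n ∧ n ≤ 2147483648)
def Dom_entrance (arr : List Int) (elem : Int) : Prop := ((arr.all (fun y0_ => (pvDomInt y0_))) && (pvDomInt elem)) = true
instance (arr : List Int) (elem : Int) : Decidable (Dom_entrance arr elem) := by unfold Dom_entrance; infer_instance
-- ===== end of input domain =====

-- B replaces A's build-indices-list-then-sum-consecutive-gaps loops by a single
-- maintain-first/last/count pass returning the telescoped closed form last - first (simpler, O(1) space).

-- ===== PORT A =====
def entrance (arr : List Int) (elem : Int) : Int :=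
  let indices : List Int :=
    (PySem.List.enumerate arr 0).filterMap (fun p => if p.2 == elem then some p.1 else none)
  if indices.length < 2 then 0
  else
    (PySem.List.pyRange 1 (indices.length : Int) 1).foldl
      (fun dist i => dist + (PySem.List.pyGetD indices i 0 - PySem.List.pyGetD indices (i - 1) 0)) 0

-- ===== PORT B =====
-- state = (first, last, count); 'first is None' → .isNone
def entrance_alt (arr : List Int) (elem : Int) : Int :=
  let s : Option Int × Option Int × Int :=
    (PySem.List.enumerate arr 0).foldl
      (fun st p =>
        if p.2 == elem then
          ((if st.1.isNone then some p.1 else st.1), some p.1, st.2.2 + 1)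
        else st)
      (none, none, 0)
  if s.2.2 ≥ 2 then s.2.1.getD 0 - s.1.getD 0 else 0

-- ===== PRECONDITION & SPEC =====
def Spec_entrance (arr : List Int) (elem : Int) (out : Int) : Prop := out = entrance_alt arr elem
instance (arr : List Int) (elem : Int) (out : Int) : Decidable (Spec_entrance arr elem out) := by unfold Spec_entrance; infer_instance

-- ===== CLAIM (what is proved, stated in full; the proofs are below) =====
def Claim_equal_entrance : Prop := ∀ (arr : List Int) (elem : Int), Dom_entrance arr elem → Spec_entrance arr elem (entrance arr elem)

-- ===== LEMMAS AND PROOFS =====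

-- indices of occurrences of elem in arr, enumeration starting at s
def pvIdx (arr : List Int) (elem : Int) (s : Int) : List Int :=
  (PySem.List.enumerate arr s).filterMap (fun p => if p.2 == elem then some p.1 else none)

theorem pvIdx_cons (x : Int) (arr : List Int) (elem s : Int) :
    pvIdx (x :: arr) elem s =
      if x == elem then s :: pvIdx arr elem (s + 1) else pvIdx arr elem (s + 1) := by
  simp only [pvIdx, PySem.List.enumerate_cons, List.filterMap_cons]
  by_cases h : x == elem <;> simp [h]

-- B's fold computes (first <|> head?, getLast? <|> last, count + length) of the index list
theorem pvFold_inv (arr : List Int) (elem : Int) (s : Int)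
    (f l : Option Int) (c : Int) :
    (PySem.List.enumerate arr s).foldl
      (fun st p =>
        if p.2 == elem then
          ((if st.1.isNone then some p.1 else st.1), some p.1, st.2.2 + 1)
        else st)
      (f, l, c)
    = (f.or (pvIdx arr elem s).head?,
       ((pvIdx arr elem s).getLast?).or l,
       c + (pvIdx arr elem s).length) := by
  induction arr generalizing s f l c with
  | nil => simp [pvIdx, PySem.List.enumerate_nil]
  | cons x arr ih =>
    rw [PySem.List.enumerate_cons, List.foldl_cons, pvIdx_cons]
    by_cases h : x == elem
    · simp only [h, if_true]
      rw [ih]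
      refine Prod.ext ?_ (Prod.ext ?_ ?_)
      · cases f <;> simp
      · simp [List.getLast?_cons, Option.or_some]
      · simp; ring
    · simp only [h, Bool.false_eq_true, if_false]
      rw [ih]

-- A's gap-sum telescopes: sum over i ∈ range(1, n) of l[i] - l[i-1] = l[n-1] - l[0]
theorem pvTelescope (l : List Int) (n : Nat) (h1 : 1 ≤ n) (h2 : n ≤ l.length) :
    (PySem.List.pyRange 1 (n : Int) 1).foldl
      (fun dist i => dist + (PySem.List.pyGetD l i 0 - PySem.List.pyGetD l (i - 1) 0)) 0
    = PySem.List.pyGetD l ((n : Int) - 1) 0 - PySem.List.pyGetD l 0 0 := by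
  induction n with
  | zero => omega
  | succ m ih =>
    by_cases hm : m = 0
    · subst hm
      have : ((1 : Nat) : Int) = 1 := by norm_num
      rw [this, PySem.List.pyRange_one_eq_nil (by omega)]
      simp
    · have hm1 : 1 ≤ m := by omega
      have hcast : ((m + 1 : Nat) : Int) = (m : Int) + 1 := by push_cast; ring
      rw [hcast, PySem.List.pyRange_one_succ_right (by exact_mod_cast Nat.one_le_cast.mpr hm1),
        List.foldl_append, ih hm1 (by omega)]
      simp only [List.foldl_cons, List.foldl_nil]
      ring_nf

theorem entrance_eq (arr : List Int) (elem : Int) :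
    entrance arr elem = entrance_alt arr elem := by
  unfold entrance entrance_alt
  rw [show ((PySem.List.enumerate arr 0).filterMap
      (fun p => if p.2 == elem then some p.1 else none)) = pvIdx arr elem 0 from rfl]
  rw [pvFold_inv]
  simp only [Option.none_or, Option.or_none]
  set idx := pvIdx arr elem 0 with hidx
  by_cases h2 : idx.length < 2
  · simp only [h2, if_true]
    have : ¬ ((0 : Int) + (idx.length : Int) ≥ 2) := by
      simp; omega
    rw [if_neg this]
  · simp only [h2, if_false]
    have hge : (0 : Int) + (idx.length : Int) ≥ 2 := by
      omega
    rw [if_pos hge]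
    have hlen : 1 ≤ idx.length := by omega
    rw [pvTelescope idx idx.length hlen le_rfl]
    have hne : idx ≠ [] := by
      intro he; rw [he] at h2; simp at h2
    congr 1
    · -- pyGetD idx (len - 1) 0 = idx.getLast?.getD 0
      rw [PySem.List.pyGetD_eq_getElem idx 0 (by omega) (by omega)]
      have ht : ((idx.length : Int) - 1).toNat = idx.length - 1 := by omega
      rw [List.getLast?_eq_getElem?]
      simp [ht, List.getElem?_eq_getElem (by omega : idx.length - 1 < idx.length)]
    · -- pyGetD idx 0 0 = idx.head?.getD 0
      rw [PySem.List.pyGetD_zero]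
      cases idx <;> simp_all

-- ===== VERDICT (by name: the statement is the Claim_ definition above) =====
theorem entrance_spec : Claim_equal_entrance := by
  intro arr elem _
  unfold Spec_entrance
  exact entrance_eq arr elem
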